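-- pv_equiv track=rewrite | github.com/szLyk/ruankao_mid | week01/04-18周六/练习脚本_综合复习.py | decimal_to_complement
-- ===== SOURCE A (Python) =====
-- def decimal_to_binary(decimal):
--     """十进制转二进制"""
--     if decimal == 0:
--         return "0"
--     result = ""
--     while decimal > 0:
--         result = str(decimal % 2) + result
--         decimal //= 2
--     return result
--
-- def decimal_to_complement(decimal, bits=8):
--     """十进制转补码"""
--     if decimal >= 0:
--         # 正数：直接转二进制，补齐位数
--         binary = decimal_to_binary(decimal)
--         return binary.zfill(bits)
--     else:
--         # 负数：取反加1
--         # 先计算绝对值的二进制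
--         abs_binary = decimal_to_binary(abs(decimal)).zfill(bits)
--         # 取反
--         inverted = "".join("1" if b == "0" else "0" for b in abs_binary)
--         # 加1
--         result = ""
--         carry = 1
--         for b in reversed(inverted):
--             if b == "0" and carry == 1:
--                 result = "1" + result
--                 carry = 0
--             elif b == "1" and carry == 1:
--                 result = "0" + result
--                 carry = 1
--             else:
--                 result = b + result
--         return result
-- ===== SOURCE B (Python) =====
-- def decimal_to_complement(decimal, bits=8):
--     if decimal >= 0:
--         return format(decimal, 'b').zfill(bits)
--     # width A effectively works at: the zfilled abs-binary's length
--     L = max(len(format(-decimal, 'b')), bits, 0)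
--     # closed-form two's complement: 2**L + decimal == 2**L - abs(decimal)
--     return format(2 ** L + decimal, 'b').zfill(L)
-- ===== Notes on version B (the rewrite author's own statement) =====
-- stated objective: alternative
-- what changed: Replaces the negative branch's bit-by-bit invert string and ripple-carry add-1 loop with closed-form arithmetic: the result is just the binary of 2**L + decimal zero-filled to the working width L, and the hand-written division loop for binary conversion becomes format(n, 'b').
import Mathlib
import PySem

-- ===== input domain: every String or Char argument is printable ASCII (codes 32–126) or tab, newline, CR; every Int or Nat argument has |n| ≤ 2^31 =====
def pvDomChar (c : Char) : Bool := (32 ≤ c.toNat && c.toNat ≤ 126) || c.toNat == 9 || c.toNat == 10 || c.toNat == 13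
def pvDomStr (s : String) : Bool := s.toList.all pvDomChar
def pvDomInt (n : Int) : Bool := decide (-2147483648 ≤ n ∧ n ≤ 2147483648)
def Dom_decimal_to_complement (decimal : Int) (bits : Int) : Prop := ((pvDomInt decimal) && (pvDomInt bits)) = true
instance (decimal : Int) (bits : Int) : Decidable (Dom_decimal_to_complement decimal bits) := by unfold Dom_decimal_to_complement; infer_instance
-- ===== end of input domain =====

-- B replaces the invert-then-ripple-carry negative branch by the closed-form complement 2^L + decimal
-- (alternative decomposition; return value only, no side effects in either version).

-- ===== PORT A =====
-- while decimal > 0: result = str(decimal % 2) + result; decimal //= 2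
def pvDtbLoop (decimal : Int) (result : List Char) : List Char :=
  if h : 0 < decimal then
    pvDtbLoop (PySem.Int.floordiv decimal 2) (PySem.Int.toChars (PySem.Int.mod decimal 2) ++ result)
  else result
termination_by decimal.toNat
decreasing_by
  rw [PySem.Int.floordiv_eq_ediv_of_pos (by norm_num)]
  omega

def pvDecimalToBinary (decimal : Int) : List Char :=
  if decimal = 0 then ['0'] else pvDtbLoop decimal []

-- "".join("1" if b == "0" else "0" for b in abs_binary)
def pvInvert (abs_binary : List Char) : List Char :=
  abs_binary.map (fun b => if b = '0' then '1' else '0')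

-- for b in reversed(inverted): … (state: result, carry)
def pvAddOneLoop : List Char → List Char → Int → List Char
  | [], result, _ => result
  | b :: rest, result, carry =>
    if b = '0' ∧ carry = 1 then pvAddOneLoop rest ('1' :: result) 0
    else if b = '1' ∧ carry = 1 then pvAddOneLoop rest ('0' :: result) 1
    else pvAddOneLoop rest (b :: result) carry

def decimal_to_complement (decimal : Int) (bits : Int) : String :=
  if decimal ≥ 0 then
    String.mk (PySem.Chars.zfill (pvDecimalToBinary decimal) bits)
  else
    let abs_binary := PySem.Chars.zfill (pvDecimalToBinary |decimal|) bits
    let inverted := pvInvert abs_binary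
    String.mk (pvAddOneLoop inverted.reverse [] 1)

-- ===== PORT B =====
def decimal_to_complement_alt (decimal : Int) (bits : Int) : String :=
  if decimal ≥ 0 then
    String.mk (PySem.Chars.zfill (PySem.Int.toBinChars decimal) bits)
  else
    let L : Int := max (max ((PySem.Int.toBinChars (-decimal)).length : Int) bits) 0
    String.mk (PySem.Chars.zfill (PySem.Int.toBinChars (2 ^ L.toNat + decimal)) L)

-- ===== PRECONDITION & SPEC =====
def Spec_decimal_to_complement (decimal : Int) (bits : Int) (out : String) : Prop := out = decimal_to_complement_alt decimal bits
instance (decimal : Int) (bits : Int) (out : String) : Decidable (Spec_decimal_to_complement decimal bits out) := by unfold Spec_decimal_to_complement; infer_instance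

-- ===== CLAIM (what is proved, stated in full; the proofs are below) =====
def Claim_equal_decimal_to_complement : Prop := ∀ (decimal : Int) (bits : Int), Dom_decimal_to_complement decimal bits → Spec_decimal_to_complement decimal bits (decimal_to_complement decimal bits)

-- ===== LEMMAS AND PROOFS =====

/-- Canonical MSB-first binary digits of a natural number (`[]` for 0). -/
def natBin : Nat → List Char
  | n =>
    if h : n = 0 then []
    else natBin (n / 2) ++ [if n % 2 = 1 then '1' else '0']
decreasing_by exact Nat.div_lt_self (Nat.pos_of_ne_zero h) (by norm_num)

def pvBit (c : Char) : Nat := if c = '1' then 1 else 0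

/-- MSB-first value of a bit string. -/
def pvVal : List Char → Nat
  | [] => 0
  | c :: cs => pvBit c * 2 ^ cs.length + pvVal cs

def pvBinary (cs : List Char) : Prop := ∀ c ∈ cs, c = '0' ∨ c = '1'

lemma pvVal_cons (c : Char) (cs : List Char) : pvVal (c :: cs) = pvBit c * 2 ^ cs.length + pvVal cs := rfl

lemma pvVal_append (s t : List Char) : pvVal (s ++ t) = pvVal s * 2 ^ t.length + pvVal t := by
  induction s with
  | nil => simp [pvVal]
  | cons c s ih =>
    rw [List.cons_append, pvVal_cons, pvVal_cons, ih]
    simp only [List.length_append, pow_add]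
    ring

lemma pvVal_lt (s : List Char) : pvVal s < 2 ^ s.length := by
  induction s with
  | nil => simp [pvVal]
  | cons c cs ih =>
    rw [pvVal_cons]
    have : pvBit c ≤ 1 := by unfold pvBit; split <;> omega
    simp only [List.length_cons, pow_succ]
    nlinarith

lemma pvVal_replicate (k : Nat) : pvVal (List.replicate k '0') = 0 := by
  induction k with
  | zero => simp [pvVal]
  | succ k ih => rw [List.replicate_succ, pvVal_cons, ih]; simp [pvBit]

lemma one_mem_of_pvVal_ne (s : List Char) (h : pvVal s ≠ 0) : '1' ∈ s := by
  induction s with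
  | nil => simp [pvVal] at h
  | cons c cs ih =>
    rw [pvVal_cons] at h
    by_cases hc : c = '1'
    · simp [hc]
    · simp [pvBit, hc] at h
      exact List.mem_cons_of_mem _ (ih h)

-- natBin facts
lemma natBin_binary (n : Nat) : pvBinary (natBin n) := by
  induction n using Nat.strong_induction_on with
  | _ n ih =>
    rw [natBin]
    split
    · intro c hc; exact absurd hc (by simp)
    · rename_i h
      intro c hc
      rcases List.mem_append.1 hc with h' | h'
      · exact ih (n / 2) (Nat.div_lt_self (Nat.pos_of_ne_zero h) (by norm_num)) c h'
      · rw [List.mem_singleton] at h'; subst h'; split <;> simp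

lemma natBin_val (n : Nat) : pvVal (natBin n) = n := by
  induction n using Nat.strong_induction_on with
  | _ n ih =>
    rw [natBin]
    split
    · simp [pvVal]; omega
    · rename_i h
      rw [pvVal_append, ih (n / 2) (Nat.div_lt_self (Nat.pos_of_ne_zero h) (by norm_num))]
      have : pvVal [if n % 2 = 1 then '1' else '0'] = n % 2 := by
        rcases Nat.mod_two_eq_zero_or_one n with h2 | h2 <;> simp [h2, pvVal, pvBit]
      rw [this]
      simp only [List.length_singleton, pow_one]
      omega

lemma natBin_bounds (n : Nat) (hn : 0 < n) : 2 ^ (natBin n).length ≤ 2 * n ∧ n < 2 ^ (natBin n).length := by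
  induction n using Nat.strong_induction_on with
  | _ n ih =>
    rw [natBin]
    split
    · omega
    · rename_i h
      by_cases h2 : n / 2 = 0
      · have hn1 : n = 1 := by omega
        subst hn1
        simp [natBin]
      · have := ih (n / 2) (Nat.div_lt_self (Nat.pos_of_ne_zero h) (by norm_num)) (Nat.pos_of_ne_zero h2)
        simp only [List.length_append, List.length_singleton, pow_succ]
        omega

lemma natBin_zero : natBin 0 = [] := by rw [natBin]; simp

lemma natBin_one : natBin 1 = ['1'] := by
  rw [natBin]
  norm_num [natBin_zero]

lemma natBin_ne_nil (n : Nat) (hn : n ≠ 0) : natBin n ≠ [] := by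
  rw [natBin, dif_neg hn]
  simp

-- toDigitsCore / toBinChars
lemma toDigitsCore_eq (f : Nat) : ∀ n acc, n ≤ f →
    Nat.toDigitsCore 2 (f + 1) n acc = (if n = 0 then ['0'] else natBin n) ++ acc := by
  induction f with
  | zero =>
    intro n acc hn
    have : n = 0 := by omega
    subst this
    simp [Nat.toDigitsCore, Nat.digitChar]
  | succ f ih =>
    intro n acc hn
    rw [Nat.toDigitsCore]
    by_cases h0 : n / 2 = 0
    · have h1 : n = 0 ∨ n = 1 := by omega
      rcases h1 with h1 | h1 <;> subst h1 <;>
        simp [h0, natBin, Nat.digitChar]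
    · have hne : n ≠ 0 := by omega
      rw [if_neg h0, ih (n / 2) _ (by omega), if_neg h0]
      conv_rhs => rw [natBin]
      rw [if_neg hne, dif_neg hne]
      have : Nat.digitChar (n % 2) = (if n % 2 = 1 then '1' else '0') := by
        rcases Nat.mod_two_eq_zero_or_one n with h2 | h2 <;> simp [h2, Nat.digitChar]
      simp [this]

lemma toBinChars_nonneg (n : Int) (hn : 0 ≤ n) :
    PySem.Int.toBinChars n = (if n.toNat = 0 then ['0'] else natBin n.toNat) := by
  unfold PySem.Int.toBinChars
  rw [if_neg (by omega)]
  unfold Nat.toDigits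
  simpa using toDigitsCore_eq n.toNat n.toNat [] (le_refl _)

-- A's dtb loop
lemma pvDtbLoop_eq (n : Nat) : ∀ d res, d.toNat = n → 0 < d → pvDtbLoop d res = natBin d.toNat ++ res := by
  induction n using Nat.strong_induction_on with
  | _ n ih =>
    intro d res hdn hd
    rw [pvDtbLoop, dif_pos hd]
    have hfd : PySem.Int.floordiv d 2 = d / 2 := PySem.Int.floordiv_eq_ediv_of_pos (by norm_num)
    have hmd : PySem.Int.mod d 2 = d % 2 := PySem.Int.mod_eq_emod_of_pos (by norm_num)
    have hchars : PySem.Int.toChars (PySem.Int.mod d 2) = [if d.toNat % 2 = 1 then '1' else '0'] := by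
      rw [hmd]
      have : d % 2 = 0 ∨ d % 2 = 1 := by omega
      rcases this with h2 | h2 <;> rw [h2] <;>
        simp [PySem.Int.toChars, Nat.toDigits, Nat.toDigitsCore, Nat.digitChar] <;> omega
    rw [hchars, hfd]
    by_cases h2 : d / 2 = 0
    · rw [pvDtbLoop, dif_neg (by omega)]
      have h1 : d.toNat = 1 := by omega
      rw [h1, natBin_one]
      norm_num
    · rw [ih (d / 2).toNat (by omega) _ _ rfl (by omega)]
      conv_rhs => rw [natBin]
      rw [dif_neg (by omega)]
      have : (d / 2).toNat = d.toNat / 2 := by omega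
      have hm : d.toNat % 2 = d.toNat % 2 := rfl
      simp [this]

lemma pvDecimalToBinary_eq (d : Int) (hd : 0 ≤ d) :
    pvDecimalToBinary d = PySem.Int.toBinChars d := by
  unfold pvDecimalToBinary
  rw [toBinChars_nonneg d hd]
  by_cases h : d = 0
  · simp [h]
  · rw [if_neg h, if_neg (by omega), pvDtbLoop_eq d.toNat d [] rfl (by omega)]
    simp

-- zfill on a binary nonempty string
lemma zfill_binary (cs : List Char) (w : Int) (hb : pvBinary cs) (hne : cs ≠ []) :
    PySem.Chars.zfill cs w = List.replicate (w.toNat - cs.length) '0' ++ cs := by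
  unfold PySem.Chars.zfill
  by_cases h : w ≤ (cs.length : Int)
  · rw [if_pos h]
    have : w.toNat - cs.length = 0 := by omega
    simp [this]
  · rw [if_neg h]
    match cs, hne with
    | c :: rest, _ =>
      have := hb c (by simp)
      have hns : ¬ (c = '+' ∨ c = '-') := by
        rcases this with h | h <;> subst h <;> decide
      simp [hns]

lemma binary_replicate_append (k : Nat) (cs : List Char) (hb : pvBinary cs) :
    pvBinary (List.replicate k '0' ++ cs) := by
  intro c hc
  rcases List.mem_append.1 hc with h | h
  · left; exact List.eq_of_mem_replicate h
  · exact hb c h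

-- invert
lemma invert_length (cs : List Char) : (pvInvert cs).length = cs.length := by
  simp [pvInvert]

lemma invert_binary (cs : List Char) : pvBinary (pvInvert cs) := by
  intro c hc
  simp [pvInvert] at hc
  obtain ⟨b, _, hb⟩ := hc
  split at hb <;> simp [← hb]

lemma invert_val (cs : List Char) (hb : pvBinary cs) :
    pvVal (pvInvert cs) + pvVal cs + 1 = 2 ^ cs.length := by
  induction cs with
  | nil => simp [pvInvert, pvVal]
  | cons c cs ih =>
    have hb' : pvBinary cs := fun x hx => hb x (List.mem_cons_of_mem _ hx)
    have hih := ih hb'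
    simp only [pvInvert, List.map_cons] at *
    rw [pvVal_cons, pvVal_cons]
    simp only [List.length_map, List.length_cons, pow_succ]
    rcases hb c (by simp) with h | h <;> subst h <;> simp [pvBit] <;> omega

lemma zero_mem_invert (cs : List Char) (h : '1' ∈ cs) : '0' ∈ pvInvert cs := by
  simp [pvInvert]
  exact ⟨'1', h, by decide⟩

-- the add-one loop
/-- LSB-first increment (carry dropped past the end). -/
def pvInc : List Char → List Char
  | [] => []
  | c :: r => if c = '0' then '1' :: r else '0' :: pvInc r

lemma pvAddOneLoop_zero (t : List Char) : ∀ res, pvAddOneLoop t res 0 = t.reverse ++ res := by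
  induction t with
  | nil => simp [pvAddOneLoop]
  | cons c t ih =>
    intro res
    rw [pvAddOneLoop]
    rw [if_neg (by simp), if_neg (by simp), ih]
    simp

lemma pvAddOneLoop_one (t : List Char) (hb : pvBinary t) : ∀ res,
    pvAddOneLoop t res 1 = (pvInc t).reverse ++ res := by
  induction t with
  | nil => simp [pvAddOneLoop, pvInc]
  | cons c t ih =>
    intro res
    have hb' : pvBinary t := fun x hx => hb x (List.mem_cons_of_mem _ hx)
    rw [pvAddOneLoop, pvInc]
    rcases hb c (by simp) with h | h <;> subst h
    · rw [if_pos (by simp), pvAddOneLoop_zero]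
      simp
    · rw [if_neg (by simp), if_pos (by simp), ih hb']
      simp

lemma pvInc_length (t : List Char) : (pvInc t).length = t.length := by
  induction t with
  | nil => simp [pvInc]
  | cons c t ih =>
    rw [pvInc]
    split <;> simp [ih]

lemma pvInc_binary (t : List Char) (hb : pvBinary t) : pvBinary (pvInc t) := by
  induction t with
  | nil => simpa [pvInc] using hb
  | cons c t ih =>
    have hb' : pvBinary t := fun x hx => hb x (List.mem_cons_of_mem _ hx)
    rw [pvInc]
    split
    · intro x hx
      rcases List.mem_cons.1 hx with h | h
      · right; exact h
      · exact hb' x h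
    · intro x hx
      rcases List.mem_cons.1 hx with h | h
      · left; exact h
      · exact ih hb' x h

/-- LSB-first value. -/
def pvValR : List Char → Nat
  | [] => 0
  | c :: r => pvBit c + 2 * pvValR r

lemma pvValR_eq (t : List Char) : pvValR t = pvVal t.reverse := by
  induction t with
  | nil => simp [pvValR, pvVal]
  | cons c t ih =>
    rw [pvValR, ih]
    simp [pvVal_append, pvVal_cons, pvVal, pvBit]
    ring

lemma pvInc_val (t : List Char) (hb : pvBinary t) (h0 : '0' ∈ t) :
    pvValR (pvInc t) = pvValR t + 1 := by
  induction t with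
  | nil => simp at h0
  | cons c t ih =>
    have hb' : pvBinary t := fun x hx => hb x (List.mem_cons_of_mem _ hx)
    rw [pvInc]
    by_cases hc : c = '0'
    · subst hc
      rw [if_pos rfl, pvValR, pvValR]
      simp [pvBit]
      omega
    · rcases hb c (by simp) with h | h
      · exact absurd h hc
      · subst h
        rw [if_neg (by decide), pvValR, pvValR]
        have h0' : '0' ∈ t := by
          rcases List.mem_cons.1 h0 with h | h
          · exact absurd h.symm (by decide)
          · exact h
        rw [ih hb' h0']
        simp [pvBit]
        omega

-- uniqueness of binary representation at fixed length
lemma binary_eq_of_val_eq : ∀ (s t : List Char), pvBinary s → pvBinary t → s.length = t.length →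
    pvVal s = pvVal t → s = t := by
  intro s
  induction s with
  | nil =>
    intro t _ _ hl _
    simp at hl
    exact (List.eq_nil_of_length_eq_zero hl.symm).symm
  | cons c s ih =>
    intro t hbs hbt hl hv
    match t with
    | [] => simp at hl
    | d :: t =>
      have hbs' : pvBinary s := fun x hx => hbs x (List.mem_cons_of_mem _ hx)
      have hbt' : pvBinary t := fun x hx => hbt x (List.mem_cons_of_mem _ hx)
      have hl' : s.length = t.length := by simpa using hl
      rw [pvVal_cons, pvVal_cons, hl'] at hv
      have hvs := pvVal_lt s
      have hvt := pvVal_lt t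
      rw [hl'] at hvs
      have hcd : c = d := by
        rcases hbs c (by simp) with h | h <;> rcases hbt d (by simp) with h' | h' <;>
          subst h <;> subst h' <;> first | rfl | (simp [pvBit] at hv; omega)
      subst hcd
      have : pvVal s = pvVal t := by
        rcases hbs c (by simp) with h | h <;> subst h <;> simp [pvBit] at hv <;> omega
      rw [ih t hbs' hbt' hl' this]

-- core negative-branch equality, stated over an arbitrary binary string p with positive value
lemma main_eq (p : List Char) (hb : pvBinary p) (hv : 0 < pvVal p) :
    pvAddOneLoop (pvInvert p).reverse [] 1 =
    List.replicate (p.length - (natBin (2 ^ p.length - pvVal p)).length) '0'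
      ++ natBin (2 ^ p.length - pvVal p) := by
  have hvlt : pvVal p < 2 ^ p.length := pvVal_lt p
  have h1 : '1' ∈ p := one_mem_of_pvVal_ne p (by omega)
  have h0 : '0' ∈ (pvInvert p).reverse := by
    rw [List.mem_reverse]; exact zero_mem_invert p h1
  have hinvb : pvBinary (pvInvert p) := invert_binary p
  have hinvbr : pvBinary (pvInvert p).reverse := fun x hx => hinvb x (List.mem_reverse.1 hx)
  have hA : pvAddOneLoop (pvInvert p).reverse [] 1 = (pvInc (pvInvert p).reverse).reverse := by
    rw [pvAddOneLoop_one _ hinvbr]; simp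
  have hRAlen : (pvInc (pvInvert p).reverse).reverse.length = p.length := by
    simp [pvInc_length, invert_length]
  have hRAbin : pvBinary (pvInc (pvInvert p).reverse).reverse := fun x hx =>
    pvInc_binary _ hinvbr x (List.mem_reverse.1 hx)
  have hRAval : pvVal (pvInc (pvInvert p).reverse).reverse = 2 ^ p.length - pvVal p := by
    have hiv := invert_val p hb
    have : pvVal (pvInc (pvInvert p).reverse).reverse = pvValR (pvInc (pvInvert p).reverse) := by
      rw [pvValR_eq]
    rw [this, pvInc_val _ hinvbr h0, pvValR_eq, List.reverse_reverse]
    omega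
  -- the right-hand side
  have hm1 : 0 < 2 ^ p.length - pvVal p := by omega
  have hmlt : 2 ^ p.length - pvVal p < 2 ^ p.length := by omega
  have hlm : (natBin (2 ^ p.length - pvVal p)).length ≤ p.length := by
    obtain ⟨hb1, hb2⟩ := natBin_bounds _ hm1
    by_contra hcon
    push_neg at hcon
    have h2 : 2 ^ (p.length + 1) ≤ 2 ^ (natBin (2 ^ p.length - pvVal p)).length :=
      Nat.pow_le_pow_right (by norm_num) hcon
    have h3 := le_trans h2 hb1
    rw [pow_succ] at h3
    omega
  have hRBlen : (List.replicate (p.length - (natBin (2 ^ p.length - pvVal p)).length) '0'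
      ++ natBin (2 ^ p.length - pvVal p)).length = p.length := by
    simp [List.length_replicate]
    omega
  have hRBbin := binary_replicate_append (p.length - (natBin (2 ^ p.length - pvVal p)).length)
      _ (natBin_binary (2 ^ p.length - pvVal p))
  have hRBval : pvVal (List.replicate (p.length - (natBin (2 ^ p.length - pvVal p)).length) '0'
      ++ natBin (2 ^ p.length - pvVal p)) = 2 ^ p.length - pvVal p := by
    rw [pvVal_append, pvVal_replicate, natBin_val]
    simp
  rw [hA]
  exact binary_eq_of_val_eq _ _ hRAbin hRBbin (by omega) (by rw [hRAval, hRBval])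

lemma toBinChars_natCast (m : Nat) (hm : m ≠ 0) :
    PySem.Int.toBinChars ((m : Nat) : Int) = natBin m := by
  rw [toBinChars_nonneg _ (by positivity), Int.toNat_natCast, if_neg hm]

-- main negative-branch lemma
lemma neg_branch (decimal bits : Int) (hd : decimal < 0) :
    decimal_to_complement decimal bits = decimal_to_complement_alt decimal bits := by
  unfold decimal_to_complement decimal_to_complement_alt
  rw [if_neg (by omega), if_neg (by omega)]
  show String.mk (pvAddOneLoop
      (pvInvert (PySem.Chars.zfill (pvDecimalToBinary |decimal|) bits)).reverse [] 1)
    = String.mk (PySem.Chars.zfill (PySem.Int.toBinChars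
        (2 ^ (max (max (((PySem.Int.toBinChars (-decimal)).length : Nat) : Int) bits) 0).toNat + decimal))
        (max (max (((PySem.Int.toBinChars (-decimal)).length : Nat) : Int) bits) 0))
  have ha : 0 < (-decimal).toNat := by omega
  have habs : |decimal| = (((-decimal).toNat : Nat) : Int) := by rw [abs_of_neg hd]; omega
  have hanz : (-decimal).toNat ≠ 0 := by omega
  have htb : PySem.Int.toBinChars (-decimal) = natBin (-decimal).toNat := by
    have h : (-decimal) = (((-decimal).toNat : Nat) : Int) := by omega
    conv_lhs => rw [h]
    rw [toBinChars_natCast _ hanz]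
  have hpd : pvDecimalToBinary |decimal| = natBin (-decimal).toNat := by
    rw [habs, pvDecimalToBinary_eq _ (by positivity), toBinChars_natCast _ hanz]
  have hla : 0 < (natBin (-decimal).toNat).length :=
    List.length_pos_iff.2 (natBin_ne_nil _ hanz)
  have hzf : PySem.Chars.zfill (natBin (-decimal).toNat) bits =
      List.replicate (bits.toNat - (natBin (-decimal).toNat).length) '0' ++ natBin (-decimal).toNat :=
    zfill_binary _ _ (natBin_binary _) (natBin_ne_nil _ hanz)
  rw [htb, hpd, hzf]
  have hpb : pvBinary (List.replicate (bits.toNat - (natBin (-decimal).toNat).length) '0'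
      ++ natBin (-decimal).toNat) := binary_replicate_append _ _ (natBin_binary _)
  have hpv : pvVal (List.replicate (bits.toNat - (natBin (-decimal).toNat).length) '0'
      ++ natBin (-decimal).toNat) = (-decimal).toNat := by
    rw [pvVal_append, pvVal_replicate, natBin_val]; simp
  have hplen : (List.replicate (bits.toNat - (natBin (-decimal).toNat).length) '0'
      ++ natBin (-decimal).toNat).length =
      (max (max (((natBin (-decimal).toNat).length : Nat) : Int) bits) 0).toNat := by
    simp only [List.length_append, List.length_replicate]
    rcases le_total bits (((natBin (-decimal).toNat).length : Nat) : Int) with h | h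
    · rw [max_eq_left h, max_eq_left (by positivity)]
      omega
    · rw [max_eq_right h, max_eq_left (by omega)]
      omega
  have hvlt : (-decimal).toNat <
      2 ^ (max (max (((natBin (-decimal).toNat).length : Nat) : Int) bits) 0).toNat := by
    have h := pvVal_lt (List.replicate (bits.toNat - (natBin (-decimal).toNat).length) '0'
      ++ natBin (-decimal).toNat)
    rw [hpv, hplen] at h
    exact h
  rw [main_eq _ hpb (by rw [hpv]; omega), hpv, hplen]
  have hcomp : (2 : Int) ^ (max (max (((natBin (-decimal).toNat).length : Nat) : Int) bits) 0).toNat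
      + decimal =
      (((2 ^ (max (max (((natBin (-decimal).toNat).length : Nat) : Int) bits) 0).toNat
        - (-decimal).toNat : Nat) : Nat) : Int) := by
    have hc : ((2 ^ (max (max (((natBin (-decimal).toNat).length : Nat) : Int) bits) 0).toNat : Nat) : Int)
        = (2 : Int) ^ (max (max (((natBin (-decimal).toNat).length : Nat) : Int) bits) 0).toNat := by
      push_cast; ring
    omega
  rw [hcomp, toBinChars_natCast _ (by omega),
    zfill_binary _ _ (natBin_binary _) (natBin_ne_nil _ (by omega))]

-- ===== VERDICT (by name: the statement is the Claim_ definition above) =====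
theorem decimal_to_complement_spec : Claim_equal_decimal_to_complement := by
  intro decimal bits _
  unfold Spec_decimal_to_complement
  by_cases hd : 0 ≤ decimal
  · unfold decimal_to_complement decimal_to_complement_alt
    rw [if_pos (by omega), if_pos (by omega), pvDecimalToBinary_eq _ hd]
  · exact neg_branch decimal bits (by omega)
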